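-- pv_equiv track=rewrite | github.com/nickneuer/tt-tournament | bracket.py | _seed_groups
-- ===== SOURCE A (Python) =====
-- def _seed_groups(players, preferred_group_size):
--     # for simplicity just making this only work for 2 advance
--     # make groups
--     groups = []
--     group = []
--     for i in range(len(players)):
--         # alternate group filling by pairing high seeded players
--         # with lower seeded ones
--         if i % 2 == 0:
--             p = players.pop(0)
--         else:
--             p = players.pop(-1)
--         group.append(p)
--         if len(group) == preferred_group_size:
--             groups.append(group)
--             group = []
--     # check for a remainder group of < preferred_group_size
--     if group:
--         groups.append(group)
--     # handle group adjustment when there is a remainer group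
--     if len(groups) % 2 != 0:
--         last_group = groups.pop(-1)
--         groups.reverse()
--         for i, player in enumerate(last_group):
--             groups[i].append(player)
--
--     return groups
-- ===== SOURCE B (Python) =====
-- def _seed_groups(players, preferred_group_size):
--     # Two-pointer walk from both ends (no quadratic pop(0)); does not mutate players.
--     order = []
--     lo, hi = 0, len(players) - 1
--     while lo < hi:
--         order.append(players[lo])
--         order.append(players[hi])
--         lo += 1
--         hi -= 1
--     if lo == hi:
--         order.append(players[lo])
--     groups = []
--     while order:
--         groups.append(order[:preferred_group_size])
--         order = order[preferred_group_size:]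
--     if len(groups) % 2 != 0:
--         last_group = groups.pop()
--         groups.reverse()
--         for i, player in enumerate(last_group):
--             groups[i].append(player)
--     return groups
-- ===== Notes on version B (the rewrite author's own statement) =====
-- stated objective: faster
-- what changed: A repeatedly mutates the list with pop(0)/pop(-1) (each pop(0) shifts the whole list); B reads the same ends-inward order with a two-pointer index walk and then chunks by slicing, never mutating the input.
import Mathlib
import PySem

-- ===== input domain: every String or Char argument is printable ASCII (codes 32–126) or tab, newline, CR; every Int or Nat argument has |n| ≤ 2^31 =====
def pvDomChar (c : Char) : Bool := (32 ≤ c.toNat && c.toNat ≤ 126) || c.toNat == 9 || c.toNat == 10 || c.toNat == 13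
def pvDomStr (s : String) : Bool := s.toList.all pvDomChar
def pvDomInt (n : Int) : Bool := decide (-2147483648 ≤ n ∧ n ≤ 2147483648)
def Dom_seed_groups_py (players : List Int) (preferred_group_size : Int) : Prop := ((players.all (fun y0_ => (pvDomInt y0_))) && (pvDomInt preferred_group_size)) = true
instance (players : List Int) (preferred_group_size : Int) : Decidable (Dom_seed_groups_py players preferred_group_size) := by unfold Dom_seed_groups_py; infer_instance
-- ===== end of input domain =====

-- B replaces A's quadratic pop(0)/pop(-1) consumption by an O(n) two-pointer index walk plus
-- slice chunking; equivalence is about the RETURN value only (A empties `players` in place, B does not mutate it).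

-- ===== SHARED TAIL (both Pythons end with the same remainder-group adjustment, line for line) =====
-- `for i, player in enumerate(last_group): groups[i].append(player)`
def distLoop (groups : List (List Int)) (lst : List Int) (i : Nat) : List (List Int) :=
  match lst with
  | [] => groups
  | p :: rest => distLoop (groups.modify i (· ++ [p])) rest (i + 1)

-- `if len(groups) % 2 != 0: last_group = groups.pop(-1); groups.reverse(); <distLoop>`
-- (groups is provably nonempty when the branch is taken; the `none` arm is unreachable)
def pyAdjust (groups : List (List Int)) : List (List Int) :=
  if groups.length % 2 ≠ 0 then
    match groups.getLast? with
    | none => groups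
    | some last_group => distLoop (groups.dropLast.reverse) last_group 0
  else groups

-- `group.append(p); if len(group) == preferred_group_size: groups.append(group); group = []`
def step (p : Int) (group : List Int) (groups : List (List Int)) (s : Int) : List Int × List (List Int) :=
  if ((group ++ [p]).length : Int) = s then ([], groups ++ [group ++ [p]])
  else (group ++ [p], groups)

-- ===== PORT A =====
-- `for i in range(len(players)): p = players.pop(0) if i % 2 == 0 else players.pop(-1); <step>`
-- pop? = none is Python's IndexError; unreachable here since fuel = len(players)
def aLoop (fuel : Nat) (i : Nat) (players group : List Int) (groups : List (List Int)) (s : Int) :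
    List (List Int) × List Int :=
  match fuel with
  | 0 => (groups, group)
  | f + 1 =>
    match (if i % 2 = 0 then PySem.List.pop? players 0 else PySem.List.pop? players (-1)) with
    | none => (groups, group)
    | some (p, players') =>
      aLoop f (i + 1) players' (step p group groups s).1 (step p group groups s).2 s

def seed_groups_py (players : List Int) (preferred_group_size : Int) : List (List Int) :=
  let r := aLoop players.length 0 players [] [] preferred_group_size
  pyAdjust (if r.2 ≠ [] then r.1 ++ [r.2] else r.1)

-- ===== PORT B =====
-- `while lo < hi: order += [players[lo], players[hi]]; lo += 1; hi -= 1` (fuel = len(players) suffices)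
def bMergeLoop (fuel : Nat) (players : List Int) (lo hi : Int) (order : List Int) :
    List Int × Int × Int :=
  match fuel with
  | 0 => (order, lo, hi)
  | f + 1 =>
    if lo < hi then
      bMergeLoop f players (lo + 1) (hi - 1)
        (order ++ [(PySem.List.pyGet? players lo).getD 0, (PySem.List.pyGet? players hi).getD 0])
    else (order, lo, hi)

-- `if lo == hi: order.append(players[lo])`
def bFinishMerge (players : List Int) (r : List Int × Int × Int) : List Int :=
  if r.2.1 = r.2.2 then r.1 ++ [(PySem.List.pyGet? players r.2.1).getD 0] else r.1

-- `while order: groups.append(order[:s]); order = order[s:]` (fuel = len(order) suffices when s ≥ 1)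
def bChunkLoop (fuel : Nat) (order : List Int) (groups : List (List Int)) (s : Int) : List (List Int) :=
  match fuel with
  | 0 => groups
  | f + 1 =>
    if order = [] then groups
    else bChunkLoop f (PySem.List.slice order (some s) none)
          (groups ++ [PySem.List.slice order none (some s)]) s

def seed_groups_py_alt (players : List Int) (preferred_group_size : Int) : List (List Int) :=
  let order := bFinishMerge players (bMergeLoop players.length players 0 ((players.length : Int) - 1) [])
  pyAdjust (bChunkLoop order.length order [] preferred_group_size)

-- ===== PRECONDITION & SPEC =====
def pvGroupCount (n s : Int) : Int := n / s + (if n % s ≠ 0 then 1 else 0)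
def pvLastSize (n s : Int) : Int := if n % s ≠ 0 then n % s else s

-- Pre_ excludes exactly the inputs on which A raises IndexError: nonempty players with a
-- non-positive group size, or an odd number of groups whose last group is larger than the
-- number of remaining groups (then `groups[i].append(player)` indexes past the end).
def Pre_seed_groups_py (players : List Int) (preferred_group_size : Int) : Prop :=
  players = [] ∨
  (0 < preferred_group_size ∧
    (pvGroupCount players.length preferred_group_size % 2 = 0 ∨
     pvLastSize players.length preferred_group_size ≤
       pvGroupCount players.length preferred_group_size - 1))
instance (players : List Int) (preferred_group_size : Int) :
    Decidable (Pre_seed_groups_py players preferred_group_size) := by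
  unfold Pre_seed_groups_py; infer_instance

def pvWitness_seed_groups_py : List Int × Int := ([1, 2, 3, 4], 2)

def Spec_seed_groups_py (players : List Int) (preferred_group_size : Int) (out : List (List Int)) : Prop := out = seed_groups_py_alt players preferred_group_size
instance (players : List Int) (preferred_group_size : Int) (out : List (List Int)) : Decidable (Spec_seed_groups_py players preferred_group_size out) := by unfold Spec_seed_groups_py; infer_instance

-- ===== CLAIM (what is proved, stated in full; the proofs are below) =====
def Claim_equal_seed_groups_py : Prop := ∀ (players : List Int) (preferred_group_size : Int), Dom_seed_groups_py players preferred_group_size → Pre_seed_groups_py players preferred_group_size → Spec_seed_groups_py players preferred_group_size (seed_groups_py players preferred_group_size)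

-- ===== LEMMAS AND PROOFS =====

-- the order in which both programs consume the players: ends-inward interleave
def interleave : List Int → List Int
  | [] => []
  | [x] => [x]
  | x :: y :: ys => x :: ((y :: ys).getLast (by simp)) :: interleave ((y :: ys).dropLast)
termination_by l => l.length
decreasing_by simp

-- sequential chunking of a fixed list with A's group/groups state
def chunkFold : List Int → List Int → List (List Int) → Int → List (List Int) × List Int
  | [], g, gs, _ => (gs, g)
  | p :: rest, g, gs, s => chunkFold rest (step p g gs s).1 (step p g gs s).2 s

def finishChunks (r : List (List Int) × List Int) : List (List Int) :=
  if r.2 ≠ [] then r.1 ++ [r.2] else r.1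

theorem interleave_nil : interleave [] = [] := by rw [interleave.eq_def]

theorem interleave_single (x : Int) : interleave [x] = [x] := by rw [interleave.eq_def]

theorem interleave_concat (x y : Int) (ys : List Int) :
    interleave (x :: (ys ++ [y])) = x :: y :: interleave ys := by
  cases ys with
  | nil => rw [interleave.eq_def]; simp [interleave_nil]
  | cons z zs =>
    show interleave (x :: (z :: (zs ++ [y]))) = _
    rw [interleave.eq_def]
    have h1 : (z :: (zs ++ [y])).getLast (by simp) = y := by
      have h0 : (z :: (zs ++ [y])).getLast? = some y := by
        rw [show (z :: (zs ++ [y])) = (z :: zs) ++ [y] by simp, List.getLast?_concat]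
      have h2 := List.getLast?_eq_some_getLast (l := z :: (zs ++ [y])) (by simp)
      rw [h0] at h2
      exact (Option.some.inj h2).symm
    have h2 : (z :: (zs ++ [y])).dropLast = z :: zs := by
      rw [show (z :: (zs ++ [y])) = (z :: zs) ++ [y] by simp, List.dropLast_concat]
    simp only [h1, h2]

theorem aLoop_eq : ∀ (k : Nat) (players : List Int) (i : Nat) (g : List Int)
    (gs : List (List Int)) (s : Int), players.length = k → i % 2 = 0 →
    aLoop k i players g gs s = chunkFold (interleave players) g gs s := by
  intro k
  induction k using Nat.strong_induction_on with
  | _ k IH =>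
    intro players i g gs s hlen hi
    match players with
    | [] =>
      subst hlen
      simp [aLoop, interleave_nil, chunkFold]
    | [x] =>
      subst hlen
      simp [aLoop, hi, interleave_single, chunkFold, PySem.List.pop?_zero_cons]
    | x :: y :: ys =>
      obtain ⟨zs, w, hzs⟩ : ∃ zs w, (y :: ys) = zs ++ [w] := by
        rcases List.eq_nil_or_concat (y :: ys) with h | ⟨l, b, h⟩
        · simp at h
        · exact ⟨l, b, by simpa using h⟩
      rw [hzs] at hlen ⊢
      have hk : k = zs.length + 1 + 1 := by simp at hlen; omega
      subst hk
      have h1 : ¬ (i + 1) % 2 = 0 := by omega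
      have h2 : (i + 1 + 1) % 2 = 0 := by omega
      have hrec := IH zs.length (by omega) zs (i + 1 + 1)
        (step w (step x g gs s).1 (step x g gs s).2 s).1
        (step w (step x g gs s).1 (step x g gs s).2 s).2 s rfl h2
      calc aLoop (zs.length + 1 + 1) i (x :: (zs ++ [w])) g gs s
          = aLoop (zs.length + 1) (i + 1) (zs ++ [w]) (step x g gs s).1 (step x g gs s).2 s := by
            simp [aLoop, hi, PySem.List.pop?_zero_cons]
        _ = aLoop zs.length (i + 1 + 1) zs
              (step w (step x g gs s).1 (step x g gs s).2 s).1
              (step w (step x g gs s).1 (step x g gs s).2 s).2 s := by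
            simp [aLoop, h1, PySem.List.pop?_last]
        _ = chunkFold (interleave zs) (step w (step x g gs s).1 (step x g gs s).2 s).1
              (step w (step x g gs s).1 (step x g gs s).2 s).2 s := hrec
        _ = chunkFold (interleave (x :: (zs ++ [w]))) g gs s := by
            rw [interleave_concat]
            simp [chunkFold]

theorem bMergeLoop_stop (fuel : Nat) (players : List Int) (lo hi : Int) (order : List Int)
    (h : ¬ lo < hi) : bMergeLoop fuel players lo hi order = (order, lo, hi) := by
  cases fuel <;> simp [bMergeLoop, h]

theorem merge_full : ∀ (k : Nat) (mid pre post order : List Int) (fuel : Nat),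
    mid.length = k → k ≤ fuel → post.length = pre.length →
    bFinishMerge (pre ++ (mid ++ post))
        (bMergeLoop fuel (pre ++ (mid ++ post)) (pre.length) ((pre.length : Int) + mid.length - 1) order)
      = order ++ interleave mid := by
  intro k
  induction k using Nat.strong_induction_on with
  | _ k IH =>
    intro mid pre post order fuel hlen hfuel hpp
    match mid with
    | [] =>
      rw [bMergeLoop_stop _ _ _ _ _ (by simp only [List.length_nil, Nat.cast_zero]; omega)]
      rw [bFinishMerge, if_neg (by simp only [List.length_nil, Nat.cast_zero]; omega)]
      simp [interleave_nil]
    | [m] =>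
      have hh : (pre.length : Int) + (([m] : List Int).length : Int) - 1 = (pre.length : Int) := by
        simp
      rw [hh, bMergeLoop_stop _ _ _ _ _ (by omega)]
      rw [bFinishMerge, if_pos rfl]
      show order ++ [(PySem.List.pyGet? (pre ++ (m :: post)) pre.length).getD 0] = _
      rw [PySem.List.pyGet?_append_length pre post m]
      simp [interleave_single]
    | x :: y :: ys =>
      obtain ⟨zs, w, hzs⟩ : ∃ zs w, (y :: ys) = zs ++ [w] := by
        rcases List.eq_nil_or_concat (y :: ys) with h | ⟨l, b, h⟩
        · simp at h
        · exact ⟨l, b, by simpa using h⟩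
      rw [hzs] at hlen ⊢
      have hk : k = zs.length + 2 := by simp at hlen; omega
      subst hk
      obtain ⟨f, rfl⟩ : ∃ f, fuel = f + 1 := by
        cases fuel with
        | zero => omega
        | succ f => exact ⟨f, rfl⟩
      have hL : ((x :: (zs ++ [w])) : List Int).length = zs.length + 2 := by simp
      have hP0 : pre ++ ((x :: (zs ++ [w])) ++ post) = pre ++ (x :: (zs ++ (w :: post))) := by simp
      rw [hL, hP0]
      have hlt : (pre.length : Int) < (pre.length : Int) + ((zs.length + 2 : Nat) : Int) - 1 := by
        push_cast; omega
      have hgLo : PySem.List.pyGet? (pre ++ (x :: (zs ++ (w :: post)))) (pre.length : Int)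
          = some x := PySem.List.pyGet?_append_length pre _ x
      have hgHi : PySem.List.pyGet? (pre ++ (x :: (zs ++ (w :: post))))
          ((pre.length : Int) + ((zs.length + 2 : Nat) : Int) - 1) = some w := by
        rw [show (pre.length : Int) + ((zs.length + 2 : Nat) : Int) - 1
              = ((pre ++ (x :: zs)).length : Int) by push_cast; simp; ring]
        rw [show pre ++ (x :: (zs ++ (w :: post))) = (pre ++ (x :: zs)) ++ (w :: post) by simp]
        exact PySem.List.pyGet?_append_length (pre ++ (x :: zs)) post w
      rw [show bMergeLoop (f + 1) (pre ++ (x :: (zs ++ (w :: post)))) (pre.length : Int)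
            ((pre.length : Int) + ((zs.length + 2 : Nat) : Int) - 1) order
          = bMergeLoop f (pre ++ (x :: (zs ++ (w :: post)))) ((pre.length : Int) + 1)
            ((pre.length : Int) + ((zs.length + 2 : Nat) : Int) - 1 - 1)
            (order ++ [x, w]) from by
        rw [bMergeLoop, if_pos hlt, hgLo, hgHi]; rfl]
      have hlo' : (pre.length : Int) + 1 = (((pre ++ [x]).length : Nat) : Int) := by simp
      have hhi' : (pre.length : Int) + ((zs.length + 2 : Nat) : Int) - 1 - 1
          = (((pre ++ [x]).length : Nat) : Int) + (zs.length : Int) - 1 := by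
        simp only [List.length_append, List.length_cons, List.length_nil]; push_cast; ring
      have hP3 : pre ++ (x :: (zs ++ (w :: post))) = (pre ++ [x]) ++ (zs ++ (w :: post)) := by simp
      rw [hlo', hhi', hP3]
      rw [IH zs.length (by omega) zs (pre ++ [x]) (w :: post) (order ++ [x, w]) f rfl (by omega)
        (by simp; omega)]
      rw [interleave_concat x w zs]
      simp

theorem chunkFold_short : ∀ (a g : List Int) (gs : List (List Int)) (s : Int),
    ((g ++ a).length : Int) < s → chunkFold a g gs s = (gs, g ++ a) := by
  intro a
  induction a with
  | nil => intro g gs s _; simp [chunkFold]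
  | cons p rest ih =>
    intro g gs s h
    have hne : ¬ ((g ++ [p]).length : Int) = s := by simp at h ⊢; omega
    show chunkFold rest (step p g gs s).1 (step p g gs s).2 s = _
    rw [step, if_neg hne]
    have := ih (g ++ [p]) gs s (by simp at h ⊢; omega)
    simpa using this

theorem chunkFold_fill : ∀ (a : List Int) (rest g : List Int) (gs : List (List Int)) (s : Int),
    a ≠ [] → ((g ++ a).length : Int) = s →
    chunkFold (a ++ rest) g gs s = chunkFold rest [] (gs ++ [g ++ a]) s := by
  intro a
  induction a with
  | nil => intro rest g gs s hne _; exact absurd rfl hne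
  | cons p a' ih =>
    intro rest g gs s _ hlen
    show chunkFold (a' ++ rest) (step p g gs s).1 (step p g gs s).2 s = _
    cases a' with
    | nil =>
      have heq : ((g ++ [p]).length : Int) = s := by simpa using hlen
      rw [step, if_pos heq]
      simp
    | cons q a'' =>
      have hne : ¬ ((g ++ [p]).length : Int) = s := by simp at hlen ⊢; omega
      rw [step, if_neg hne]
      have := ih rest (g ++ [p]) gs s (by simp) (by simp at hlen ⊢; omega)
      simpa using this

theorem chunk_eq : ∀ (k : Nat) (order : List Int) (gs : List (List Int)) (s : Int) (fuel : Nat),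
    order.length = k → k ≤ fuel → 1 ≤ s →
    bChunkLoop fuel order gs s = finishChunks (chunkFold order [] gs s) := by
  intro k
  induction k using Nat.strong_induction_on with
  | _ k IH =>
    intro order gs s fuel hlen hfuel hs
    by_cases hord : order = []
    · subst hord
      cases fuel <;> simp [bChunkLoop, chunkFold, finishChunks]
    · obtain ⟨f, rfl⟩ : ∃ f, fuel = f + 1 := by
        cases fuel with
        | zero =>
          exact absurd (by omega : order.length = 0)
            (by simpa [List.length_eq_zero_iff] using hord)
        | succ f => exact ⟨f, rfl⟩
      rw [bChunkLoop, if_neg hord]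
      rw [PySem.List.slice_from _ (by omega), PySem.List.slice_to _ (by omega)]
      by_cases hle : (order.length : Int) ≤ s
      · have htake : order.take s.toNat = order := by
          apply List.take_of_length_le; omega
        have hdrop : order.drop s.toNat = [] := by
          apply List.drop_eq_nil_of_le; omega
        rw [htake, hdrop]
        have hstop : bChunkLoop f [] (gs ++ [order]) s = gs ++ [order] := by
          cases f <;> simp [bChunkLoop]
        rw [hstop]
        rcases eq_or_lt_of_le hle with heq | hlt
        · have hfill := chunkFold_fill order [] [] gs s hord (by simpa using heq)
          simp only [List.append_nil, List.nil_append] at hfill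
          rw [hfill]
          simp [chunkFold, finishChunks]
        · rw [chunkFold_short order [] gs s (by simpa using hlt)]
          simp [finishChunks, hord]
      · have htd : order = order.take s.toNat ++ order.drop s.toNat :=
          (List.take_append_drop _ _).symm
        have hlen_take : (order.take s.toNat).length = s.toNat := by
          apply List.length_take_of_le; omega
        have hne_take : order.take s.toNat ≠ [] := by
          intro h; rw [h] at hlen_take; simp at hlen_take; omega
        conv_rhs => rw [htd]
        have hfill := chunkFold_fill (order.take s.toNat) (order.drop s.toNat) [] gs s hne_take
          (by simp only [List.nil_append]; rw [hlen_take]; omega)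
        simp only [List.nil_append] at hfill
        rw [hfill]
        rw [IH (order.drop s.toNat).length (by simp; omega) (order.drop s.toNat)
          (gs ++ [order.take s.toNat]) s f rfl (by simp; omega) hs]

theorem main_eq (players : List Int) (s : Int)
    (hpre : Pre_seed_groups_py players s) :
    seed_groups_py players s = seed_groups_py_alt players s := by
  have hA := aLoop_eq players.length players 0 [] [] s rfl rfl
  have hB := merge_full players.length players [] [] [] players.length rfl le_rfl rfl
  simp only [List.nil_append, List.append_nil, List.length_nil, Nat.cast_zero, zero_add] at hB
  show pyAdjust (finishChunks (aLoop players.length 0 players [] [] s)) = _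
  rw [hA]
  show _ = pyAdjust (bChunkLoop (bFinishMerge players (bMergeLoop players.length players 0 ((players.length : Int) - 1) [])).length
    (bFinishMerge players (bMergeLoop players.length players 0 ((players.length : Int) - 1) [])) [] s)
  rw [hB]
  by_cases hnil : players = []
  · subst hnil
    simp [interleave_nil, chunkFold, finishChunks, bChunkLoop]
  · have hs : 1 ≤ s := by
      rcases hpre with h | ⟨h, _⟩
      · exact absurd h hnil
      · omega
    rw [chunk_eq (interleave players).length (interleave players) [] s
      (interleave players).length rfl le_rfl hs]

-- ===== VERDICT bottom =====
theorem seed_groups_py_spec : Claim_equal_seed_groups_py := by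
  intro players s _ hpre
  exact main_eq players s hpre
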